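-- pv_equiv track=rewrite | github.com/ITCR-IV/Star-Force | Star Force.py | check_logo_click
-- ===== SOURCE A (Python) =====
-- def check_logo_click(mx,my,i=0):
--     if i==8:
--         return i
--     else:
--         column=i%4
--         row=i//4
--         x=307+92+(80+54)*column
--         y=150+100+(80+50)*row
--         if mx>=x and mx<=(x+80):
--             if my>=y and my<=(y+80):
--                 return i
--         return check_logo_click(mx,my,i+1)
-- ===== SOURCE B (Python) =====
-- def check_logo_click(mx, my, i=0):
--     for j in range(i, 8):
--         column = j % 4
--         row = j // 4
--         x = 307 + 92 + (80 + 54) * column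
--         y = 150 + 100 + (80 + 50) * row
--         if x <= mx <= x + 80 and y <= my <= y + 80:
--             return j
--     return 8
-- ===== Notes on version B (the rewrite author's own statement) =====
-- stated objective: idiomatic
-- what changed: Replaced A's tail recursion over the box index with a single iterative for-loop over range(i, 8) that returns the first matching box, falling through to 8.
-- outside the precondition, e.g. on check_logo_click(0, 0, -950): A returns 8, B returns 8
import Mathlib
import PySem

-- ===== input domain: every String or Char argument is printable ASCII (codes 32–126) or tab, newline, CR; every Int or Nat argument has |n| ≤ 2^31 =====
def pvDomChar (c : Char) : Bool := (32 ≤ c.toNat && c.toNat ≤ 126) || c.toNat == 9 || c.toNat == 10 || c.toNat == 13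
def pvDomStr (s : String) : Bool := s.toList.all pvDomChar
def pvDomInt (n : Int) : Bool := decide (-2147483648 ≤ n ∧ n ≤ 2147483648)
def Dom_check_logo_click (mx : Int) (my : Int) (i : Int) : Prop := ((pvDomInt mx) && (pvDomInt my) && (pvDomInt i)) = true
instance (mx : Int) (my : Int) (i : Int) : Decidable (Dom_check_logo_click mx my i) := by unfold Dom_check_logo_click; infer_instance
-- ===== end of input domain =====

-- B replaces A's tail recursion over the box index with an iterative loop over range(i, 8): idiomatic, same cost.

-- ===== PORT A =====
-- A is recursive; fuel (9 - i).toNat bounds the recursion depth (within Pre_ the fuel never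
-- runs out; fuel exhaustion models A's RecursionError, which Pre_ excludes).
def check_logo_click_go (fuel : Nat) (mx : Int) (my : Int) (i : Int) : Int :=
  match fuel with
  | 0 => i  -- unreachable inside Pre_ (A raises RecursionError there)
  | n + 1 =>
    if i = 8 then i
    else
      let column := PySem.Int.mod i 4
      let row := PySem.Int.floordiv i 4
      let x := 307 + 92 + (80 + 54) * column
      let y := 150 + 100 + (80 + 50) * row
      if mx ≥ x ∧ mx ≤ x + 80 then
        if my ≥ y ∧ my ≤ y + 80 then i
        else check_logo_click_go n mx my (i + 1)
      else check_logo_click_go n mx my (i + 1)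

def check_logo_click (mx : Int) (my : Int) (i : Int) : Int :=
  check_logo_click_go (9 - i).toNat mx my i

-- ===== PORT B =====
-- the loop body: first match wins (early return), modelled by an Option accumulator
def check_logo_click_alt (mx : Int) (my : Int) (i : Int) : Int :=
  match (PySem.List.pyRange i 8 1).foldl
      (fun acc j =>
        match acc with
        | some r => some r
        | none =>
          let column := PySem.Int.mod j 4
          let row := PySem.Int.floordiv j 4
          let x := 307 + 92 + (80 + 54) * column
          let y := 150 + 100 + (80 + 50) * row
          if x ≤ mx ∧ mx ≤ x + 80 ∧ y ≤ my ∧ my ≤ y + 80 then some j else none)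
      none with
  | some j => j
  | none => 8

-- ===== PRECONDITION & SPEC =====
-- Pre_ excludes i > 8, where A's recursion never reaches the base case and raises
-- RecursionError, and very negative i, where the recursion depth 9 - i exceeds Python's
-- recursion limit (~1000, so A raises RecursionError for i below roughly -990); the bound
-- -900 keeps a safe margin below that environment-dependent limit, so it also excludes a
-- band of inputs (about -990 ≤ i < -900) on which A still returns 8.
def Pre_check_logo_click (mx : Int) (my : Int) (i : Int) : Prop := -900 ≤ i ∧ i ≤ 8
instance (mx : Int) (my : Int) (i : Int) : Decidable (Pre_check_logo_click mx my i) := by unfold Pre_check_logo_click; infer_instance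

def pvWitness_check_logo_click : Int × Int × Int := (399, 250, 0)

def Spec_check_logo_click (mx : Int) (my : Int) (i : Int) (out : Int) : Prop := out = check_logo_click_alt mx my i
instance (mx : Int) (my : Int) (i : Int) (out : Int) : Decidable (Spec_check_logo_click mx my i out) := by unfold Spec_check_logo_click; infer_instance

-- ===== CLAIM (what is proved, stated in full; the proofs are below) =====
def Claim_equal_check_logo_click : Prop := ∀ (mx : Int) (my : Int) (i : Int), Dom_check_logo_click mx my i → Pre_check_logo_click mx my i → Spec_check_logo_click mx my i (check_logo_click mx my i)

-- ===== LEMMAS AND PROOFS =====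

-- once the Option accumulator is some, the fold is constant
theorem pv_foldl_some (f : Int → Option Int) (l : List Int) (r : Int) :
    l.foldl (fun acc j => match acc with | some v => some v | none => f j) (some r) = some r := by
  induction l with
  | nil => rfl
  | cons a l ih => simpa using ih

theorem pv_go_eq_alt (n : Nat) : ∀ (mx my i : Int), (8 : Int) - i = n →
    check_logo_click_go (n + 1) mx my i = check_logo_click_alt mx my i := by
  induction n with
  | zero =>
    intro mx my i h
    have hi : i = 8 := by omega
    subst hi
    simp [check_logo_click_go, check_logo_click_alt,
      PySem.List.pyRange_one_eq_nil (a := (8 : Int)) (b := 8) le_rfl, List.foldl]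
  | succ n ih =>
    intro mx my i h
    have hi : i < 8 := by omega
    have hne : i ≠ 8 := by omega
    have hcons := PySem.List.pyRange_one_cons (a := i) (b := 8) hi
    by_cases hhit : (307 + 92 + (80 + 54) * PySem.Int.mod i 4 ≤ mx ∧
        mx ≤ 307 + 92 + (80 + 54) * PySem.Int.mod i 4 + 80 ∧
        150 + 100 + (80 + 50) * PySem.Int.floordiv i 4 ≤ my ∧
        my ≤ 150 + 100 + (80 + 50) * PySem.Int.floordiv i 4 + 80)
    · obtain ⟨h1, h2, h3, h4⟩ := hhit
      simp only [check_logo_click_go, if_neg hne, ge_iff_le]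
      rw [if_pos ⟨h1, h2⟩, if_pos ⟨h3, h4⟩]
      simp only [check_logo_click_alt, hcons, List.foldl_cons]
      rw [if_pos ⟨h1, h2, h3, h4⟩, pv_foldl_some]
    · have halt : check_logo_click_alt mx my i = check_logo_click_alt mx my (i + 1) := by
        simp only [check_logo_click_alt, hcons, List.foldl_cons]
        rw [if_neg hhit]
      rw [halt, ← ih mx my (i + 1) (by omega)]
      simp only [check_logo_click_go, if_neg hne, ge_iff_le]
      push_neg at hhit
      by_cases hx : 307 + 92 + (80 + 54) * PySem.Int.mod i 4 ≤ mx ∧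
          mx ≤ 307 + 92 + (80 + 54) * PySem.Int.mod i 4 + 80
      · rw [if_pos hx]
        have hy : ¬ (150 + 100 + (80 + 50) * PySem.Int.floordiv i 4 ≤ my ∧
            my ≤ 150 + 100 + (80 + 50) * PySem.Int.floordiv i 4 + 80) := by
          intro hy
          exact absurd (hhit hx.1 hx.2 hy.1) (by omega)
        rw [if_neg hy]
      · rw [if_neg hx]

-- ===== VERDICT (by name: the statement is the Claim_ definition above) =====
theorem check_logo_click_spec : Claim_equal_check_logo_click := by
  intro mx my i _ hpre
  obtain ⟨h1, h2⟩ := hpre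
  unfold Spec_check_logo_click check_logo_click
  have hfuel : (9 - i).toNat = ((8 : Int) - i).toNat + 1 := by omega
  rw [hfuel, pv_go_eq_alt ((8 : Int) - i).toNat mx my i (by omega)]
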